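-- pv_equiv track=rewrite | github.com/VidyaCKabber/Python-Programmimg | Triples.py | findNumberOfTriples
-- ===== SOURCE A (Python) =====
-- def findNumberOfTriples(nums, diff):
--     counter = 0
--
--     for index, num in enumerate(nums):
--         nums_j = diff + num
--         nums_k = 2 * diff + num
--
--         if nums_k in nums and nums_j in nums:
--             jth_index = nums.index(nums_j)
--             kth_index = nums.index(nums_k)
--             if index < jth_index< kth_index:
--                 counter += 1
--
--     return counter
-- ===== SOURCE B (Python) =====
-- def findNumberOfTriples(nums, diff):
--     # Group indices by value, then count per distinct value instead of per position:
--     # for each value v, all its occurrences before first(v+diff) contribute at once.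
--     occ = {}
--     for i, v in enumerate(nums):
--         occ.setdefault(v, []).append(i)
--     total = 0
--     for v, idxs in occ.items():
--         jl = occ.get(v + diff, [])
--         kl = occ.get(v + 2 * diff, [])
--         if jl and kl and jl[0] < kl[0]:
--             total += sum(1 for i in idxs if i < jl[0])
--     return total
-- ===== Notes on version B (the rewrite author's own statement) =====
-- stated objective: faster
-- what changed: aggregates by value instead of per position: one pass groups indices by value into a dict, then one loop over distinct values adds, for each value v whose v+diff/v+2diff first occurrences are ordered, the number of occurrences of v before first(v+diff) at once — no per-element membership or index scans remain
import Mathlib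
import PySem

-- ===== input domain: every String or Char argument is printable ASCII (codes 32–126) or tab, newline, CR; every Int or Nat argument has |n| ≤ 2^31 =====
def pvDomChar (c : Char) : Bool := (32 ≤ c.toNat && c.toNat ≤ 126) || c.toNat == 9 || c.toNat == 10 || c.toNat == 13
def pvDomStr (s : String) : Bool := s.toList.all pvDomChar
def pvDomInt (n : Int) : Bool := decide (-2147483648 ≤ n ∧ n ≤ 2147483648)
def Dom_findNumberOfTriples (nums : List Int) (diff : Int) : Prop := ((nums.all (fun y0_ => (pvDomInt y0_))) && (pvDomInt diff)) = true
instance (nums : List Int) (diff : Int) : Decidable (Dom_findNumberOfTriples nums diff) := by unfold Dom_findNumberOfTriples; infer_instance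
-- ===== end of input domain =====

-- B aggregates by value (a dict value -> list of its indices, then one loop over
-- distinct values) instead of A's per-position membership/index scans; measured faster (O(n) vs O(n^2)).


-- ===== PORT A =====
-- 'nums_k in nums and nums_j in nums' is the membership test; the two guarded
-- nums.index calls are index? (the guard makes them always succeed in Python).
def findNumberOfTriples (nums : List Int) (diff : Int) : Int :=
  (PySem.List.enumerate nums).foldl (fun counter p =>
    let nums_j := diff + p.2
    let nums_k := 2 * diff + p.2
    if nums_k ∈ nums ∧ nums_j ∈ nums then
      match PySem.List.index? nums nums_j, PySem.List.index? nums nums_k with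
      | some jth_index, some kth_index =>
          if p.1 < (jth_index : Int) ∧ (jth_index : Int) < (kth_index : Int) then
            counter + 1
          else counter
      | _, _ => counter
    else counter) 0

-- ===== PORT B =====
-- 'jl and kl' is Python truthiness = both lists nonempty; jl[0]/kl[0] are the heads.
def findNumberOfTriples_alt (nums : List Int) (diff : Int) : Int :=
  let occ : PySem.Dict Int (List Int) :=
    (PySem.List.enumerate nums).foldl (fun d p => d.modify p.2 [] (· ++ [p.1])) PySem.Dict.empty
  occ.items.foldl (fun total q =>
    let jl := occ.getD (q.1 + diff) []
    let kl := occ.getD (q.1 + 2 * diff) []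
    if jl ≠ [] ∧ kl ≠ [] ∧ jl.headD 0 < kl.headD 0 then
      total + q.2.foldl (fun s i => if i < jl.headD 0 then s + 1 else s) 0
    else total) 0

-- ===== PRECONDITION & SPEC =====
def Spec_findNumberOfTriples (nums : List Int) (diff : Int) (out : Int) : Prop := out = findNumberOfTriples_alt nums diff
instance (nums : List Int) (diff : Int) (out : Int) : Decidable (Spec_findNumberOfTriples nums diff out) := by unfold Spec_findNumberOfTriples; infer_instance

-- ===== CLAIM (what is proved, stated in full; the proofs are below) =====
def Claim_equal_findNumberOfTriples : Prop := ∀ (nums : List Int) (diff : Int), Dom_findNumberOfTriples nums diff → Spec_findNumberOfTriples nums diff (findNumberOfTriples nums diff)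

-- ===== LEMMAS AND PROOFS =====

-- the grouping dict B builds
def buildOcc (nums : List Int) : PySem.Dict Int (List Int) :=
  (PySem.List.enumerate nums).foldl (fun d p => d.modify p.2 [] (· ++ [p.1])) PySem.Dict.empty

-- the indices at which v occurs, in order
def fiber (nums : List Int) (v : Int) : List Int :=
  ((PySem.List.enumerate nums).filter (fun p => p.2 == v)).map (·.1)

-- A's per-element contribution
def aVal (nums : List Int) (diff : Int) (p : Int × Int) : Int :=
  if 2 * diff + p.2 ∈ nums ∧ diff + p.2 ∈ nums then
    match PySem.List.index? nums (diff + p.2), PySem.List.index? nums (2 * diff + p.2) with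
    | some jth_index, some kth_index =>
        if p.1 < (jth_index : Int) ∧ (jth_index : Int) < (kth_index : Int) then 1 else 0
    | _, _ => 0
  else 0

-- B's per-item contribution
def bVal (nums : List Int) (diff : Int) (q : Int × List Int) : Int :=
  let jl := (buildOcc nums).getD (q.1 + diff) []
  let kl := (buildOcc nums).getD (q.1 + 2 * diff) []
  if jl ≠ [] ∧ kl ≠ [] ∧ jl.headD 0 < kl.headD 0 then
    (q.2.map (fun i => if i < jl.headD 0 then (1 : Int) else 0)).sum
  else 0

theorem occ_getD (nums : List Int) (v : Int) :
    (buildOcc nums).getD v [] = fiber nums v := by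
  unfold buildOcc fiber
  have h : (PySem.List.enumerate nums).foldl (fun d p => d.modify p.2 [] (· ++ [p.1])) PySem.Dict.empty
      = ((PySem.List.enumerate nums).map Prod.swap).foldl (fun d p => d.modify p.1 [] (· ++ [p.2])) PySem.Dict.empty := by
    rw [List.foldl_map]; rfl
  rw [h, PySem.Dict.getD_foldl_modify_append]
  simp [List.filter_map, List.map_map, Function.comp_def, PySem.Dict.getD_empty]

theorem occ_keys (nums : List Int) : (buildOcc nums).keys = PySem.Set.ofList nums := by
  unfold buildOcc
  rw [PySem.Dict.keys_foldl_modify_key (key := fun p : Int × Int => p.2)]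
  simp only [PySem.List.map_snd_enumerate]
  exact PySem.Set.update_nil_left nums

theorem occ_keys_nodup (nums : List Int) : (buildOcc nums).keys.Nodup := by
  rw [occ_keys]; exact PySem.Set.nodup_ofList nums

theorem fiber_head (nums : List Int) (v : Int) : ∀ s : Int,
    (((PySem.List.enumerate nums s).filter (fun p => p.2 == v)).map (·.1)).head?
      = (PySem.List.index? nums v).map (fun n => s + (n : Int)) := by
  induction nums with
  | nil => intro s; simp [PySem.List.enumerate_nil]
  | cons x xs ih =>
    intro s
    rw [PySem.List.enumerate_cons]
    by_cases hx : x = v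
    · subst hx
      rw [PySem.List.index?_cons_self]
      simp
    · have h1 : PySem.List.index? (x :: xs) v = (PySem.List.index? xs v).map (· + 1) :=
        PySem.List.index?_cons_of_ne xs hx
      rw [h1]
      have h2 : ((s, x).2 == v) = false := by simpa using hx
      rw [List.filter_cons]
      simp only [h2, Bool.false_eq_true, if_false]
      rw [ih (s + 1)]
      cases PySem.List.index? xs v with
      | none => simp
      | some n => simp; ring

theorem sum_ite_zero (a c : Int) : ∀ ks : List Int, a ∉ ks →
    (ks.map (fun k => if a == k then c else 0)).sum = 0 := by
  intro ks ha
  apply List.sum_eq_zero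
  intro x hx
  obtain ⟨k, hk, rfl⟩ := List.mem_map.mp hx
  have : ¬ a = k := fun h => ha (h ▸ hk)
  simp [this]

theorem sum_ite_single (a c : Int) : ∀ ks : List Int, ks.Nodup → a ∈ ks →
    (ks.map (fun k => if a == k then c else 0)).sum = c := by
  intro ks
  induction ks with
  | nil => intro _ h; simp at h
  | cons k ks ih =>
    intro hnd hmem
    rw [List.map_cons, List.sum_cons]
    rcases List.mem_cons.mp hmem with rfl | hm
    · have : a ∉ ks := (List.nodup_cons.mp hnd).1
      rw [sum_ite_zero a c ks this]
      simp
    · have hne : ¬ a = k := by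
        rintro rfl; exact (List.nodup_cons.mp hnd).1 hm
      rw [ih (List.nodup_cons.mp hnd).2 hm]
      simp [hne]

theorem sum_map_fiber (g : Int × Int → Int) (ks : List Int) (hnd : ks.Nodup) :
    ∀ l : List (Int × Int), (∀ x ∈ l, x.2 ∈ ks) →
      (l.map g).sum = (ks.map (fun k => ((l.filter (fun x => x.2 == k)).map g).sum)).sum := by
  intro l
  induction l with
  | nil => intro _; simp
  | cons x l ih =>
    intro hall
    have hx : x.2 ∈ ks := hall x (List.mem_cons_self)
    rw [List.map_cons, List.sum_cons, ih (fun y hy => hall y (List.mem_cons_of_mem _ hy))]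
    have hsplit : ∀ k : Int, (((x :: l).filter (fun y => y.2 == k)).map g).sum
        = (if x.2 == k then g x else 0) + ((l.filter (fun y => y.2 == k)).map g).sum := by
      intro k
      rw [List.filter_cons]
      by_cases h : (x.2 == k) = true
      · simp [h]
      · simp [h]
    calc g x + (ks.map (fun k => ((l.filter (fun y => y.2 == k)).map g).sum)).sum
        = (ks.map (fun k => (if x.2 == k then g x else 0))).sum
          + (ks.map (fun k => ((l.filter (fun y => y.2 == k)).map g).sum)).sum := by
          rw [sum_ite_single x.2 (g x) ks hnd hx]
      _ = (ks.map (fun k => (if x.2 == k then g x else 0)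
            + ((l.filter (fun y => y.2 == k)).map g).sum)).sum := by
          rw [← PySem.List.sum_map_add_int]
      _ = (ks.map (fun k => (((x :: l).filter (fun y => y.2 == k)).map g).sum)).sum := by
          exact congrArg _ (List.map_congr_left (fun k _ => (hsplit k).symm))

theorem fiber_cons_of_mem (nums : List Int) (w : Int) (hw : w ∈ nums) :
    ∃ (j : Nat) (t : List Int), PySem.List.index? nums w = some j ∧ fiber nums w = (j : Int) :: t := by
  obtain ⟨j, hj⟩ := Option.isSome_iff_exists.mp ((PySem.List.index?_isSome_iff nums w).mpr hw)
  cases hft : fiber nums w with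
  | nil =>
    exfalso
    rw [fiber] at hft
    have hh := fiber_head nums w 0
    rw [hj, hft] at hh
    simp at hh
  | cons a t =>
    have hh := fiber_head nums w 0
    rw [fiber] at hft
    rw [hj, hft] at hh
    have ha : a = (j : Int) := by simpa using hh
    exact ⟨j, t, hj, by rw [ha]⟩

theorem fiber_nil_of_not_mem (nums : List Int) (w : Int) (hw : w ∉ nums) :
    fiber nums w = [] := by
  have hh := fiber_head nums w 0
  rw [(PySem.List.index?_eq_none_iff nums w).mpr hw] at hh
  rw [fiber]
  exact List.head?_eq_none_iff.mp (by simpa using hh)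

theorem fiber_sum_eq_bVal (nums : List Int) (diff : Int) (v : Int) (_hv : v ∈ nums) :
    (((PySem.List.enumerate nums).filter (fun p => p.2 == v)).map (aVal nums diff)).sum
      = bVal nums diff (v, fiber nums v) := by
  by_cases hmem : 2 * diff + v ∈ nums ∧ diff + v ∈ nums
  · obtain ⟨j, tj, hj, hfj⟩ := fiber_cons_of_mem nums (diff + v) hmem.2
    obtain ⟨k, tk, hk, hfk⟩ := fiber_cons_of_mem nums (2 * diff + v) hmem.1
    have hgj : (buildOcc nums).getD (v + diff) [] = (j : Int) :: tj := by
      rw [occ_getD, add_comm v diff]; exact hfj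
    have hgk : (buildOcc nums).getD (v + 2 * diff) [] = (k : Int) :: tk := by
      rw [occ_getD, show v + 2 * diff = 2 * diff + v by ring]; exact hfk
    have hB : bVal nums diff (v, fiber nums v)
        = if (j : Int) < (k : Int) then
            ((fiber nums v).map (fun i => if i < (j : Int) then (1 : Int) else 0)).sum
          else 0 := by
      unfold bVal
      simp only [hgj, hgk]
      simp
    have hA : ∀ p ∈ (PySem.List.enumerate nums).filter (fun p => p.2 == v),
        aVal nums diff p = if (j : Int) < (k : Int) then
            (if p.1 < (j : Int) then (1 : Int) else 0) else 0 := by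
      intro p hp
      have hpv : p.2 = v := by simpa using (List.mem_filter.mp hp).2
      unfold aVal
      rw [hpv, if_pos hmem, hj, hk]
      by_cases hjk : (j : Int) < (k : Int)
      · simp [hjk]
      · simp [hjk]
    rw [List.map_congr_left hA, hB]
    by_cases hjk : (j : Int) < (k : Int)
    · simp only [if_pos hjk]
      rw [fiber, List.map_map]
      rfl
    · simp [hjk]
  · have hB : bVal nums diff (v, fiber nums v) = 0 := by
      unfold bVal
      rcases Decidable.not_and_iff_not_or_not.mp hmem with h | h
      · have hz : (buildOcc nums).getD (v + 2 * diff) [] = [] := by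
          rw [occ_getD, show v + 2 * diff = 2 * diff + v by ring]
          exact fiber_nil_of_not_mem nums _ h
        simp [hz]
      · have hz : (buildOcc nums).getD (v + diff) [] = [] := by
          rw [occ_getD, add_comm v diff]
          exact fiber_nil_of_not_mem nums _ h
        simp [hz]
    rw [hB]
    apply List.sum_eq_zero
    intro x hx
    obtain ⟨p, hp, rfl⟩ := List.mem_map.mp hx
    have hpv : p.2 = v := by simpa using (List.mem_filter.mp hp).2
    unfold aVal
    rw [hpv, if_neg hmem]

theorem inner_fold (j0 : Int) (l : List Int) :
    l.foldl (fun s i => if i < j0 then s + 1 else s) 0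
      = (l.map (fun i => if i < j0 then (1 : Int) else 0)).sum := by
  have h : (fun (s : Int) (i : Int) => if i < j0 then s + 1 else s)
      = fun s i => s + (if i < j0 then (1 : Int) else 0) := by
    funext s i; split_ifs <;> ring
  rw [h, PySem.List.foldl_add]
  ring

theorem a_eq_sum (nums : List Int) (diff : Int) :
    findNumberOfTriples nums diff = ((PySem.List.enumerate nums).map (aVal nums diff)).sum := by
  unfold findNumberOfTriples
  have h : (fun (counter : Int) (p : Int × Int) =>
      let nums_j := diff + p.2
      let nums_k := 2 * diff + p.2
      if nums_k ∈ nums ∧ nums_j ∈ nums then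
        match PySem.List.index? nums nums_j, PySem.List.index? nums nums_k with
        | some jth_index, some kth_index =>
            if p.1 < (jth_index : Int) ∧ (jth_index : Int) < (kth_index : Int) then
              counter + 1
            else counter
        | _, _ => counter
      else counter)
      = fun counter p => counter + aVal nums diff p := by
    funext c p
    unfold aVal
    by_cases hm : 2 * diff + p.2 ∈ nums ∧ diff + p.2 ∈ nums
    · simp only [hm]
      rcases PySem.List.index? nums (diff + p.2) with _ | j <;>
        rcases PySem.List.index? nums (2 * diff + p.2) with _ | k <;>
        simp <;> split_ifs <;> ring
    · simp [hm]
  rw [h, PySem.List.foldl_add]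
  ring

theorem b_eq_sum (nums : List Int) (diff : Int) :
    findNumberOfTriples_alt nums diff
      = ((PySem.Set.ofList nums).map (fun v => bVal nums diff (v, fiber nums v))).sum := by
  have hb : findNumberOfTriples_alt nums diff
      = (buildOcc nums).items.foldl (fun total q =>
          let jl := (buildOcc nums).getD (q.1 + diff) []
          let kl := (buildOcc nums).getD (q.1 + 2 * diff) []
          if jl ≠ [] ∧ kl ≠ [] ∧ jl.headD 0 < kl.headD 0 then
            total + q.2.foldl (fun s i => if i < jl.headD 0 then s + 1 else s) 0
          else total) 0 := rfl
  rw [hb]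
  have h : (fun (total : Int) (q : Int × List Int) =>
      let jl := (buildOcc nums).getD (q.1 + diff) []
      let kl := (buildOcc nums).getD (q.1 + 2 * diff) []
      if jl ≠ [] ∧ kl ≠ [] ∧ jl.headD 0 < kl.headD 0 then
        total + q.2.foldl (fun s i => if i < jl.headD 0 then s + 1 else s) 0
      else total)
      = fun total q => total + bVal nums diff q := by
    funext t q
    unfold bVal
    simp only [inner_fold]
    split_ifs <;> ring
  rw [h, PySem.List.foldl_add]
  rw [PySem.Dict.items_eq_map_keys (buildOcc nums) (occ_keys_nodup nums) []]
  rw [occ_keys]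
  simp only [List.map_map]
  have h2 : ∀ v ∈ PySem.Set.ofList nums,
      (bVal nums diff ∘ fun k => (k, (buildOcc nums).getD k [])) v
        = (fun v => bVal nums diff (v, fiber nums v)) v := by
    intro v _
    simp [occ_getD]
  rw [List.map_congr_left h2]
  ring

-- ===== VERDICT (by name: the statement is the Claim_ definition above) =====
theorem findNumberOfTriples_spec : Claim_equal_findNumberOfTriples := by
  intro nums diff _
  show findNumberOfTriples nums diff = findNumberOfTriples_alt nums diff
  rw [a_eq_sum, b_eq_sum]
  rw [sum_map_fiber (aVal nums diff) (PySem.Set.ofList nums) (PySem.Set.nodup_ofList nums)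
      (PySem.List.enumerate nums)
      (fun x hx => by
        rw [PySem.Set.mem_ofList]
        have : x.2 ∈ (PySem.List.enumerate nums).map (·.2) := List.mem_map_of_mem hx
        rwa [PySem.List.map_snd_enumerate] at this)]
  apply congrArg
  apply List.map_congr_left
  intro v hv
  exact fiber_sum_eq_bVal nums diff v ((PySem.Set.mem_ofList nums v).mp hv)
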